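-- pv_equiv track=rewrite | github.com/ankushKun/pkmn-infinity-league | generate_pokemon_data.py | get_moves_by_type
-- ===== SOURCE A (Python) =====
-- from typing import Dict, List, Any
--
-- def get_moves_by_type(moves_data: List[Dict]) -> Dict[str, List[Dict]]:
--     """Group moves by their type."""
--     moves_by_type = {}
--     for move in moves_data:
--         move_type = move.get("type", "Normal")
--         if move_type not in moves_by_type:
--             moves_by_type[move_type] = []
--         moves_by_type[move_type].append(move)
--     return moves_by_type
-- ===== SOURCE B (Python) =====
-- def get_moves_by_type(moves_data):
--     """Group moves by their type: distinct types in first-occurrence order,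
--     then one filter pass per type (gathering instead of dispatching)."""
--     key = lambda m: m.get("type", "Normal")
--     order = list(dict.fromkeys(key(m) for m in moves_data))
--     return {t: [m for m in moves_data if key(m) == t] for t in order}
-- ===== Notes on version B (the rewrite author's own statement) =====
-- stated objective: alternative
-- what changed: Instead of one dispatch pass appending each move into a mutable dict bucket, B first computes the distinct type keys in first-occurrence order (dict.fromkeys) and then builds the result by filtering the whole list once per type.
import Mathlib
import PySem

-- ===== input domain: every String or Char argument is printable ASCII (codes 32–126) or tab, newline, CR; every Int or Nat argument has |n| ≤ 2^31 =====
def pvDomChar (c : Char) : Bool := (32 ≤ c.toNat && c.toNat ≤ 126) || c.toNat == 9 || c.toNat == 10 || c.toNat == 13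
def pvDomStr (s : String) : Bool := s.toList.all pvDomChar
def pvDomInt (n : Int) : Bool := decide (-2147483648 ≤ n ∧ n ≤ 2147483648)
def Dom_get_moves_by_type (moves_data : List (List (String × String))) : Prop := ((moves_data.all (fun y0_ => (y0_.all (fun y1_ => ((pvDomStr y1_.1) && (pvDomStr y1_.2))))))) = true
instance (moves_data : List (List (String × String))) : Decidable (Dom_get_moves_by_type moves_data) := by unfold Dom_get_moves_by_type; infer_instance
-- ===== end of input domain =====

-- ===== PORT A =====
def get_moves_by_type (moves_data : List (List (String × String))) : List (String × List (List (String × String))) :=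
  (moves_data.foldl (fun moves_by_type move =>
      let move_type := (PySem.Dict.mk move).getD "type" "Normal"
      let moves_by_type :=
        if moves_by_type.contains move_type then moves_by_type
        else moves_by_type.insert move_type []
      moves_by_type.modify move_type [] (fun l => l ++ [move]))
    PySem.Dict.empty).items

-- ===== PORT B =====
def pvKey (m : List (String × String)) : String := (PySem.Dict.mk m).getD "type" "Normal"

def get_moves_by_type_alt (moves_data : List (List (String × String))) : List (String × List (List (String × String))) :=
  (PySem.List.dedup (moves_data.map pvKey)).map
    (fun t => (t, moves_data.filter (fun m => pvKey m == t)))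

-- ===== PRECONDITION & SPEC =====
def Spec_get_moves_by_type (moves_data : List (List (String × String))) (out : List (String × List (List (String × String)))) : Prop := out = get_moves_by_type_alt moves_data
instance (moves_data : List (List (String × String))) (out : List (String × List (List (String × String)))) : Decidable (Spec_get_moves_by_type moves_data out) := by unfold Spec_get_moves_by_type; infer_instance

-- ===== CLAIM (what is proved, stated in full; the proofs are below) =====
def Claim_equal_get_moves_by_type : Prop := ∀ (moves_data : List (List (String × String))), Dom_get_moves_by_type moves_data → Spec_get_moves_by_type moves_data (get_moves_by_type moves_data)

-- ===== LEMMAS AND PROOFS =====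
-- B groups by gathering: distinct keys in first-occurrence order, then one filter per key; same return value as A (alternative decomposition, no speed claim).

lemma pv_step_eq :
    (fun (d : PySem.Dict String (List (List (String × String)))) (move : List (String × String)) =>
      let move_type := (PySem.Dict.mk move).getD "type" "Normal"
      let d' := if d.contains move_type then d else d.insert move_type []
      d'.modify move_type [] (fun l => l ++ [move]))
    = (fun d move => d.modify (pvKey move) [] (fun l => l ++ [move])) := by
  funext d move
  simp only [pvKey]
  by_cases h : d.contains ((PySem.Dict.mk move).getD "type" "Normal")
  · simp [h]
  · have h' : d.contains ((PySem.Dict.mk move).getD "type" "Normal") = false := by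
      simpa using h
    simp [h', PySem.Dict.modify, PySem.Dict.getD_insert_self,
      PySem.Dict.insert_insert_self, PySem.Dict.getD_of_not_contains _ _ h']

lemma pv_dict_eq (moves_data : List (List (String × String))) :
    get_moves_by_type moves_data = get_moves_by_type_alt moves_data := by
  unfold get_moves_by_type get_moves_by_type_alt
  rw [show (fun (moves_by_type : PySem.Dict String (List (List (String × String)))) move =>
      let move_type := (PySem.Dict.mk move).getD "type" "Normal"
      let moves_by_type' :=
        if moves_by_type.contains move_type then moves_by_type
        else moves_by_type.insert move_type []
      moves_by_type'.modify move_type [] (fun l => l ++ [move]))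
    = (fun d move => d.modify (pvKey move) [] (fun l => l ++ [move])) from pv_step_eq]
  have hnd : (moves_data.foldl (fun d move => d.modify (pvKey move) [] (fun l => l ++ [move]))
      PySem.Dict.empty).keys.Nodup := by
    exact PySem.Dict.nodup_keys_foldl_modify_key moves_data pvKey []
      (fun _ move l => l ++ [move]) PySem.Dict.empty (by simp)
  rw [PySem.Dict.items_eq_map_keys _ hnd []]
  rw [PySem.Dict.keys_foldl_modify_key moves_data pvKey [] (fun _ move l => l ++ [move])
    PySem.Dict.empty]
  have hkeys : PySem.Set.update (PySem.Dict.empty :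
      PySem.Dict String (List (List (String × String)))).keys (moves_data.map pvKey)
      = PySem.List.dedup (moves_data.map pvKey) := rfl
  rw [hkeys]
  apply List.map_congr_left
  intro t _
  congr 1
  have := PySem.Dict.getD_foldl_modify_append
    (moves_data.map (fun m => (pvKey m, m)))
    (PySem.Dict.empty : PySem.Dict String (List (List (String × String)))) t
  rw [List.foldl_map] at this
  simpa [List.filter_map, Function.comp_def] using this

-- ===== VERDICT (by name: the statement is the Claim_ definition above) =====
theorem get_moves_by_type_spec : Claim_equal_get_moves_by_type := by
  intro moves_data _
  unfold Spec_get_moves_by_type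
  exact pv_dict_eq moves_data
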